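-- pv_equiv track=rewrite | github.com/mohamedsathik/Authentication | ByteHandler.py | bytesAdd
-- ===== SOURCE A (Python) =====
-- def bytesAdd(x, y):
--     l = (len(y[0]) + len(y[1]))//2
--     c = 0
--     s = 1
--     for i in range(len(x)):
--         if c == l:
--             c = 0
--             s += 1
--         a = (y[0][c] * s) % 256
--         b = (y[1][c] * s) % 256
--         x[i] =  (x[i] + a + b) % 256
--         c += 1
--     return x
-- ===== SOURCE B (Python) =====
-- def bytesAdd(x, y):
--     l = (len(y[0]) + len(y[1])) // 2
--     out = []
--     rest = x
--     s = 1
--     while rest: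
--         chunk, rest = rest[:l], rest[l:]
--         out.extend((v + (y[0][c] * s) % 256 + (y[1][c] * s) % 256) % 256
--                    for c, v in enumerate(chunk))
--         s += 1
--     x[:] = out
--     return x
-- ===== Notes on version B (the rewrite author's own statement) =====
-- stated objective: alternative
-- what changed: Replaces A's single indexed loop with running counters c/s and a reset branch by a staged block-wise pass: the input is peeled into chunks of the cycle length l, each chunk is combined with the pattern at its block's multiplier via enumerate, and the results are concatenated.
import Mathlib
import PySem

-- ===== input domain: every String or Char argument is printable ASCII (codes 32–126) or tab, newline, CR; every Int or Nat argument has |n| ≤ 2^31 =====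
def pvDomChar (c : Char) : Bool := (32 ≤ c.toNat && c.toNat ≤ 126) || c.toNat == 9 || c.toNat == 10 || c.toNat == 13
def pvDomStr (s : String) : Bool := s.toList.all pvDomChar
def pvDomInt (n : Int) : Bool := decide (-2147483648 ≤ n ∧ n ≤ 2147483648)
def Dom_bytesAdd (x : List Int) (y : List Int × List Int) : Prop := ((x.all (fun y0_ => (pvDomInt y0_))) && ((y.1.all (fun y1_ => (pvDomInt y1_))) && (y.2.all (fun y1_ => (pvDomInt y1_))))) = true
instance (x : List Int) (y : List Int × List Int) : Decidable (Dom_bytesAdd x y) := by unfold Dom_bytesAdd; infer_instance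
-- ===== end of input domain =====

-- B replaces A's single indexed loop with running counters c/s and a reset branch by a
-- staged block-wise pass: peel chunks of the cycle length l off the front, combine each
-- chunk with its block's multiplier via enumerate, and concatenate (objective: alternative).
-- Both Pythons write the result back into x in place; the equivalence proved here is
-- about the return value.

-- ===== PORT A =====
-- the body of A's for-loop, acting on the state (xs, c, s)
def stepA (y : List Int × List Int) (l : Int) (st : List Int × Int × Int) (i : Int) :
    List Int × Int × Int :=
  let cs := if st.2.1 = l then ((0 : Int), st.2.2 + 1) else (st.2.1, st.2.2)
  let a := PySem.Int.mod (PySem.List.pyGetD y.1 cs.1 0 * cs.2) 256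
  let b := PySem.Int.mod (PySem.List.pyGetD y.2 cs.1 0 * cs.2) 256
  (PySem.List.pySetD st.1 i
      (PySem.Int.mod (PySem.List.pyGetD st.1 i 0 + a + b) 256),
    cs.1 + 1, cs.2)

def bytesAdd (x : List Int) (y : List Int × List Int) : List Int :=
  let l : Int := PySem.Int.floordiv ((y.1.length : Int) + (y.2.length : Int)) 2
  ((PySem.List.pyRange 0 (x.length : Int) 1).foldl (stepA y l) (x, 0, 1)).1

-- ===== PORT B =====
-- one chunk combined with the pattern at multiplier s (the generator inside extend)
def chunkOut (y : List Int × List Int) (s : Int) (chunk : List Int) : List Int :=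
  (PySem.List.enumerate chunk 0).map (fun p =>
    PySem.Int.mod (p.2
      + PySem.Int.mod (PySem.List.pyGetD y.1 p.1 0 * s) 256
      + PySem.Int.mod (PySem.List.pyGetD y.2 p.1 0 * s) 256) 256)

-- Source B's while loop over rest; fuel = len x bounds the number of iterations (each
-- iteration drops l ≥ 1 elements on the admitted inputs)
def goB (y : List Int × List Int) (l : Int) : Nat → Int → List Int → List Int
  | 0, _, _ => []
  | _ + 1, _, [] => []
  | fuel + 1, s, r :: rest =>
    chunkOut y s (PySem.List.slice (r :: rest) none (some l)) ++
      goB y l fuel (s + 1) (PySem.List.slice (r :: rest) (some l) none)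

def bytesAdd_alt (x : List Int) (y : List Int × List Int) : List Int :=
  let l : Int := PySem.Int.floordiv ((y.1.length : Int) + (y.2.length : Int)) 2
  goB y l x.length 1 x

-- ===== PRECONDITION & SPEC =====
-- Pre_ excludes exactly the inputs on which A raises IndexError: a non-empty x with
-- cycle length l = (len(y[0])+len(y[1]))//2 equal to 0, or a cycle index that reaches
-- past the end of y[0] or y[1].
def Pre_bytesAdd (x : List Int) (y : List Int × List Int) : Prop :=
  x = [] ∨
    (0 < (y.1.length + y.2.length) / 2 ∧
      min ((y.1.length + y.2.length) / 2) x.length ≤ y.1.length ∧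
      min ((y.1.length + y.2.length) / 2) x.length ≤ y.2.length)
instance (x : List Int) (y : List Int × List Int) : Decidable (Pre_bytesAdd x y) := by
  unfold Pre_bytesAdd; infer_instance

def pvWitness_bytesAdd : List Int × (List Int × List Int) := ([1, 2, 3], ([10, 20], [30, 40]))

def Spec_bytesAdd (x : List Int) (y : List Int × List Int) (out : List Int) : Prop := out = bytesAdd_alt x y
instance (x : List Int) (y : List Int × List Int) (out : List Int) : Decidable (Spec_bytesAdd x y out) := by unfold Spec_bytesAdd; infer_instance

-- ===== CLAIM (what is proved, stated in full; the proofs are below) =====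
def Claim_equal_bytesAdd : Prop := ∀ (x : List Int) (y : List Int × List Int), Dom_bytesAdd x y → Pre_bytesAdd x y → Spec_bytesAdd x y (bytesAdd x y)

-- ===== LEMMAS AND PROOFS =====

-- the per-element value both sides compute at Nat position j when started at multiplier 1
def elemB (y : List Int × List Int) (L : Nat) (j : Nat) (v : Int) : Int :=
  PySem.Int.mod (v
    + PySem.Int.mod (PySem.List.pyGetD y.1 ((j % L : Nat) : Int) 0 * (1 + ((j / L : Nat) : Int))) 256
    + PySem.Int.mod (PySem.List.pyGetD y.2 ((j % L : Nat) : Int) 0 * (1 + ((j / L : Nat) : Int))) 256) 256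

-- the per-element value of goB started at multiplier s
def fB (y : List Int × List Int) (L : Nat) (s : Int) (j : Nat) (v : Int) : Int :=
  PySem.Int.mod (v
    + PySem.Int.mod (PySem.List.pyGetD y.1 ((j % L : Nat) : Int) 0 * (s + ((j / L : Nat) : Int))) 256
    + PySem.Int.mod (PySem.List.pyGetD y.2 ((j % L : Nat) : Int) 0 * (s + ((j / L : Nat) : Int))) 256) 256

-- the list A's loop has produced after k iterations: the first k positions updated
def updA (x : List Int) (y : List Int × List Int) (L : Nat) (k : Nat) : List Int :=
  x.mapIdx (fun j v => if j < k then elemB y L j v else v)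

theorem succ_md_ne (L k : Nat) (hl : 0 < L) (h : k % L + 1 ≠ L) :
    (k+1) % L = k % L + 1 ∧ (k+1)/L = k/L := by
  have hd := Nat.div_add_mod k L
  have hr : k % L < L := Nat.mod_lt _ hl
  have hr1 : k % L + 1 < L := by omega
  have h1 : k + 1 = L * (k / L) + (k % L + 1) := by omega
  rw [h1]
  exact ⟨by rw [Nat.mul_add_mod]; exact Nat.mod_eq_of_lt hr1,
         by rw [Nat.mul_add_div hl, Nat.div_eq_of_lt hr1, Nat.add_zero]⟩

theorem succ_md_eq (L k : Nat) (hl : 0 < L) (h : k % L + 1 = L) :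
    (k+1) % L = 0 ∧ (k+1)/L = k/L + 1 := by
  have hd := Nat.div_add_mod k L
  have h1 : k + 1 = L * (k / L) + L := by omega
  have h2 : k + 1 = L * (k / L + 1) := by rw [h1, Nat.mul_succ]
  rw [h2]
  exact ⟨Nat.mul_mod_right L _, Nat.mul_div_cancel_left _ hl⟩

theorem updA_zero (x : List Int) (y : List Int × List Int) (L : Nat) :
    updA x y L 0 = x := by
  apply List.ext_getElem
  · simp [updA]
  · intro j hj1 hj2
    simp [updA, List.getElem_mapIdx]

theorem updA_set (x : List Int) (y : List Int × List Int) (L k : Nat) (hk : k < x.length) :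
    (updA x y L k).set k (elemB y L k x[k]) = updA x y L (k+1) := by
  apply List.ext_getElem
  · simp [updA]
  · intro j hj1 hj2
    simp only [updA, List.getElem_set, List.getElem_mapIdx]
    split_ifs <;> simp_all <;> omega

theorem stepA_eval (y : List Int × List Int) (l : Int) (xs : List Int) (c s i M S : Int)
    (h : (if c = l then ((0 : Int), s + 1) else (c, s)) = (M, S)) :
    stepA y l (xs, c, s) i
      = (PySem.List.pySetD xs i
          (PySem.Int.mod (PySem.List.pyGetD xs i 0
            + PySem.Int.mod (PySem.List.pyGetD y.1 M 0 * S) 256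
            + PySem.Int.mod (PySem.List.pyGetD y.2 M 0 * S) 256) 256),
        M + 1, S) := by
  simp only [stepA, h]

theorem invA (x : List Int) (y : List Int × List Int) (L : Nat)
    (hl : 0 < L) (k : Nat) (hk : k ≤ x.length) :
    ∃ c s : Int,
      (PySem.List.pyRange 0 (k : Int) 1).foldl (stepA y (L : Int)) (x, 0, 1)
        = (updA x y L k, c, s) ∧
      (if c = (L : Int) then ((0 : Int), s + 1) else (c, s))
        = (((k % L : Nat) : Int), ((1 + k / L : Nat) : Int)) := by
  induction k with
  | zero =>
    refine ⟨0, 1, ?_, ?_⟩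
    · have h0 : PySem.List.pyRange 0 ((0:Nat) : Int) 1 = [] := by norm_num [PySem.List.pyRange]
      rw [h0, updA_zero]
      rfl
    · have hne : ((0:Int)) ≠ (L : Int) := by exact_mod_cast Nat.ne_of_lt hl
      simp [hne]
  | succ k ih =>
    obtain ⟨c, s, hfold, hnorm⟩ := ih (by omega)
    have hklen : k < x.length := by omega
    have hrange : PySem.List.pyRange 0 ((k+1 : Nat) : Int) 1
        = PySem.List.pyRange 0 (k : Int) 1 ++ [(k : Int)] := by
      push_cast
      exact PySem.List.pyRange_one_succ_right (by positivity)
    rw [hrange, List.foldl_append, hfold]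
    simp only [List.foldl_cons, List.foldl_nil]
    rw [stepA_eval y (L : Int) _ c s (k : Int) _ _ hnorm]
    refine ⟨((k % L : Nat) : Int) + 1, ((1 + k / L : Nat) : Int), ?_, ?_⟩
    · have hlen : k < (updA x y L k).length := by simp [updA]; omega
      have hget : PySem.List.pyGetD (updA x y L k) (k : Int) 0 = x[k] := by
        rw [PySem.List.pyGetD_natCast, List.getD_eq_getElem _ _ hlen]
        simp [updA, List.getElem_mapIdx]
      have hset : ∀ v, PySem.List.pySetD (updA x y L k) (k : Int) v
          = (updA x y L k).set k v := by
        intro v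
        simp [PySem.List.pySetD, PySem.List.pySet?_natCast _ _ _ hlen]
      have hS : ((1 + k / L : Nat) : Int) = 1 + ((k / L : Nat) : Int) := by push_cast; ring
      rw [hget, hset, hS]
      have hstep := updA_set x y L k hklen
      simp only [elemB] at hstep
      rw [hstep]
    · by_cases hh : k % L + 1 = L
      · have hcast : ((k % L : Nat) : Int) + 1 = (L : Int) := by
          exact_mod_cast congrArg (Nat.cast : Nat → Int) hh
        obtain ⟨hm, hd⟩ := succ_md_eq L k hl hh
        rw [if_pos hcast, hm, hd]
        simp only [Prod.mk.injEq]
        constructor <;> push_cast <;> ring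
      · have hcast : ((k % L : Nat) : Int) + 1 ≠ (L : Int) := by
          intro hc; exact hh (by exact_mod_cast hc)
        obtain ⟨hm, hd⟩ := succ_md_ne L k hl hh
        rw [if_neg hcast, hm, hd]
        simp only [Prod.mk.injEq]
        constructor <;> push_cast <;> ring

theorem l_eq_cast (y : List Int × List Int) :
    PySem.Int.floordiv ((y.1.length : Int) + (y.2.length : Int)) 2
      = (((y.1.length + y.2.length) / 2 : Nat) : Int) := by
  have h := PySem.Int.floordiv_natCast (y.1.length + y.2.length) 2
  push_cast at h ⊢
  exact h

theorem updA_full_eq (x : List Int) (y : List Int × List Int) (L : Nat) :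
    updA x y L x.length = x.mapIdx (fun j v => elemB y L j v) := by
  apply List.ext_getElem
  · simp [updA]
  · intro j hj1 hj2
    have hjx : j < x.length := by simpa [updA] using hj1
    simp [updA, List.getElem_mapIdx, hjx]

theorem chunkOut_eq (y : List Int × List Int) (s : Int) (chunk : List Int) :
    chunkOut y s chunk
      = chunk.mapIdx (fun c v =>
          PySem.Int.mod (v
            + PySem.Int.mod (PySem.List.pyGetD y.1 (c : Int) 0 * s) 256
            + PySem.Int.mod (PySem.List.pyGetD y.2 (c : Int) 0 * s) 256) 256) := by
  apply List.ext_getElem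
  · simp [chunkOut, PySem.List.length_enumerate]
  · intro j hj1 hj2
    have hje : j < (PySem.List.enumerate chunk 0).length := by
      simpa [chunkOut, PySem.List.length_enumerate] using hj1
    simp [chunkOut, List.getElem_mapIdx, PySem.List.getElem_enumerate chunk 0 j hje]

theorem goB_eq (y : List Int × List Int) (L : Nat) (hl : 0 < L) :
    ∀ (fuel : Nat) (rest : List Int) (s : Int), rest.length ≤ fuel →
      goB y (L : Int) fuel s rest = rest.mapIdx (fun j v => fB y L s j v) := by
  intro fuel
  induction fuel with
  | zero =>
    intro rest s hle
    have : rest = [] := List.eq_nil_of_length_eq_zero (by omega)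
    subst this; rfl
  | succ fuel ih =>
    intro rest s hle
    match rest with
    | [] => rfl
    | r :: t =>
      have hne : r :: t ≠ [] := by simp
      show chunkOut y s (PySem.List.slice (r :: t) none (some (L : Int))) ++
          goB y (L : Int) fuel (s + 1) (PySem.List.slice (r :: t) (some (L : Int)) none)
        = (r :: t).mapIdx (fun j v => fB y L s j v)
      rw [PySem.List.slice_to_natCast, PySem.List.slice_from_natCast]
      have hdrop : ((r :: t).drop L).length ≤ fuel := by
        simp only [List.length_drop, List.length_cons] at *
        omega
      rw [ih _ (s + 1) hdrop, chunkOut_eq]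
      -- split the right-hand side at position L
      conv_rhs => rw [← List.take_append_drop L (r :: t), List.mapIdx_append]
      congr 1
      · -- inside the first chunk: j % L = j, j / L = 0
        apply List.ext_getElem
        · simp
        · intro j hj1 hj2
          have hjL : j < L := by
            have := hj1; simp only [List.length_mapIdx, List.length_take] at this; omega
          simp only [List.getElem_mapIdx, fB,
            Nat.mod_eq_of_lt hjL, Nat.div_eq_of_lt hjL]
          norm_num
      · -- beyond the first chunk: (j + L) % L = j % L, (j + L) / L = j / L + 1
        apply List.ext_getElem
        · simp
        · intro j hj1 hj2
          simp only [List.length_mapIdx, List.length_drop] at hj1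
          have htk : (List.take L (r :: t)).length = L := by
            simp only [List.length_take]; omega
          simp only [List.getElem_mapIdx, fB, htk]
          have hm : (j + L) % L = j % L := Nat.add_mod_right j L
          have hd : (j + L) / L = j / L + 1 := by rw [Nat.add_div_right _ hl]
          rw [hm, hd]
          have hcast : ((j / L + 1 : Nat) : Int) = ((j / L : Nat) : Int) + 1 := by
            push_cast; ring
          rw [hcast]
          ring_nf

theorem fB_one (y : List Int × List Int) (L : Nat) (j : Nat) (v : Int) :
    fB y L 1 j v = elemB y L j v := rfl

theorem bytesAdd_eq_of_pre (x : List Int) (y : List Int × List Int)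
    (hl : 0 < (y.1.length + y.2.length) / 2) :
    bytesAdd x y = bytesAdd_alt x y := by
  obtain ⟨c, s, hfold, -⟩ :=
    invA x y ((y.1.length + y.2.length) / 2) hl x.length (Nat.le_refl _)
  simp only [bytesAdd, bytesAdd_alt, l_eq_cast y, hfold]
  rw [updA_full_eq, goB_eq y _ hl x.length x 1 (Nat.le_refl _)]
  simp only [fB_one]

theorem bytesAdd_nil (y : List Int × List Int) : bytesAdd [] y = bytesAdd_alt [] y := by
  simp [bytesAdd, bytesAdd_alt, goB]

-- ===== VERDICT (by name: the statement is the Claim_ definition above) =====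
theorem bytesAdd_spec : Claim_equal_bytesAdd := by
  intro x y _ hpre
  unfold Spec_bytesAdd
  rcases hpre with hx | ⟨hl, -, -⟩
  · subst hx; exact bytesAdd_nil y
  · exact bytesAdd_eq_of_pre x y hl
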